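-- pv_equiv track=rewrite | github.com/mrbungie/mib_cars_analysis | slidedeck/build_model_reports.py | normalize_feature_name
-- ===== SOURCE A (Python) =====
-- def normalize_feature_name(transformed_name: str, original_features: list[str]) -> str:
--     name = str(transformed_name)
--     for prefix in [
--         "numerical__",
--         "categorical__",
--         "binning__",
--         "remainder__",
--         "scaler__",
--     ]:
--         if name.startswith(prefix):
--             name = name[len(prefix) :]
--     feature_order = sorted(original_features, key=len, reverse=True)
--     for feature in feature_order:
--         feature = str(feature)
--         if name == feature:
--             return feature
--         if (
--             name.startswith(feature + "_")
--             or name.startswith(feature + "[")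
--             or name.startswith(feature + "__")
--             or name.startswith(feature + ":")
--         ):
--             return feature
--     for feature in feature_order:
--         feature = str(feature)
--         if feature in name:
--             return feature
--     return name
-- ===== SOURCE B (Python) =====
-- def normalize_feature_name(transformed_name: str, original_features: list[str]) -> str:
--     name = str(transformed_name)
--     for prefix in [
--         "numerical__",
--         "categorical__",
--         "binning__",
--         "remainder__",
--         "scaler__",
--     ]:
--         if name.startswith(prefix):
--             name = name[len(prefix):]
--     best = None
--     for f in original_features:
--         f = str(f)
--         if (best is None or len(f) > len(best)) and (
--             name == f
--             or name.startswith(f + "_")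
--             or name.startswith(f + "[")
--             or name.startswith(f + "__")
--             or name.startswith(f + ":")
--         ):
--             best = f
--     if best is not None:
--         return best
--     for f in original_features:
--         f = str(f)
--         if (best is None or len(f) > len(best)) and f in name:
--             best = f
--     if best is not None:
--         return best
--     return name
-- ===== Notes on version B (the rewrite author's own statement) =====
-- stated objective: alternative
-- what changed: Replaces the length-descending sort plus two early-return scans with two single in-order passes that keep the longest matching feature seen so far (testing a feature only when it is strictly longer than the current best), which reproduces A's longest-wins, first-in-original-order tie-break without sorting.
import Mathlib
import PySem

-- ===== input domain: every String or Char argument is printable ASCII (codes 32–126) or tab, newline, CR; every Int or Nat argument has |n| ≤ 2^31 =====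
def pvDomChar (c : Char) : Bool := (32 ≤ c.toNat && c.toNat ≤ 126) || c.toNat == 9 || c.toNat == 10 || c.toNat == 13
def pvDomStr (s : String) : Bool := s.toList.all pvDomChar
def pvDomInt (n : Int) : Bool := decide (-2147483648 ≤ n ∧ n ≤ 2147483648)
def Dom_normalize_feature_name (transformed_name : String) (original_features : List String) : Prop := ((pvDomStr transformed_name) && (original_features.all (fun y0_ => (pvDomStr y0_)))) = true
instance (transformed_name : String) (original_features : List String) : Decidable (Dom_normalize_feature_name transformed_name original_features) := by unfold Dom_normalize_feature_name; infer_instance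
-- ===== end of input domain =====

-- B replaces A's length-descending sort + two early-return scans by two single in-order passes
-- keeping the longest match so far (first-maximal, reproducing A's tie-break), without sorting.


-- shared helpers: both Pythons begin with the identical prefix-stripping loop and test
-- the identical per-feature conditions (exact on ASCII via PySem.Chars)
def pvStrip (name : List Char) : List Char :=
  ["numerical__".toList, "categorical__".toList, "binning__".toList,
   "remainder__".toList, "scaler__".toList].foldl
    (fun n p => if PySem.Chars.startswith n p then n.drop p.length else n) name

def pvTier1 (name f : List Char) : Bool :=
  decide (name = f)
  || PySem.Chars.startswith name (f ++ ['_'])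
  || PySem.Chars.startswith name (f ++ ['['])
  || PySem.Chars.startswith name (f ++ ['_', '_'])
  || PySem.Chars.startswith name (f ++ [':'])

def pvTier2 (name f : List Char) : Bool := PySem.Chars.isIn f name

-- ===== PORT A =====
def normalize_feature_name (transformed_name : String) (original_features : List String) : String :=
  let name := pvStrip transformed_name.toList
  let feature_order := PySem.List.sorted original_features (fun f => f.toList.length) true
  match feature_order.find? (fun f => pvTier1 name f.toList) with
  | some f => f
  | none =>
    match feature_order.find? (fun f => pvTier2 name f.toList) with
    | some f => f
    | none => String.ofList name

-- ===== PORT B =====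
def pvLonger (best : Option String) (f : String) : Bool :=
  match best with
  | none => true
  | some b => decide (b.toList.length < f.toList.length)

def normalize_feature_name_alt (transformed_name : String) (original_features : List String) : String :=
  let name := pvStrip transformed_name.toList
  let best1 := original_features.foldl
    (fun best f => if pvLonger best f && pvTier1 name f.toList then some f else best) none
  match best1 with
  | some f => f
  | none =>
    let best2 := original_features.foldl
      (fun best f => if pvLonger best f && pvTier2 name f.toList then some f else best) none
    match best2 with
    | some f => f
    | none => String.ofList name

-- ===== PRECONDITION & SPEC =====
def Spec_normalize_feature_name (transformed_name : String) (original_features : List String) (out : String) : Prop := out = normalize_feature_name_alt transformed_name original_features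
instance (transformed_name : String) (original_features : List String) (out : String) : Decidable (Spec_normalize_feature_name transformed_name original_features out) := by unfold Spec_normalize_feature_name; infer_instance

-- ===== CLAIM (what is proved, stated in full; the proofs are below) =====
def Claim_equal_normalize_feature_name : Prop := ∀ (transformed_name : String) (original_features : List String), Dom_normalize_feature_name transformed_name original_features → Spec_normalize_feature_name transformed_name original_features (normalize_feature_name transformed_name original_features)

-- ===== LEMMAS AND PROOFS =====

-- find? over an insertion into a key-descending list = one max?-fold step
lemma pv_find?_insertBy {α κ : Type} [LinearOrder κ] (key : α → κ) (p : α → Bool) (x : α) :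
    ∀ (l : List α), l.Pairwise (fun a b => key b ≤ key a) →
    (PySem.List.insertBy (fun a b => decide (key b < key a)) x l).find? p =
      match l.find? p with
      | none => if p x then some x else none
      | some m => if p x && decide (key m < key x) then some x else some m := by
  intro l
  induction l with
  | nil =>
    intro _
    simp [PySem.List.insertBy, List.find?]
  | cons y ys ih =>
    intro hp
    rw [List.pairwise_cons] at hp
    by_cases hxy : key y < key x
    · have hb : PySem.List.insertBy (fun a b => decide (key b < key a)) x (y :: ys)
          = x :: y :: ys := by simp [PySem.List.insertBy, hxy]
      rw [hb]
      rcases hfy : (y :: ys).find? p with _ | m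
      · cases hpx : p x
        · rw [List.find?_cons_of_neg (by simp [hpx]), hfy]
          simp
        · rw [List.find?_cons_of_pos hpx]
          simp
      · have hm : m ∈ y :: ys := List.mem_of_find?_eq_some hfy
        have hkm : key m < key x := by
          rcases List.mem_cons.mp hm with h | h
          · exact h ▸ hxy
          · exact lt_of_le_of_lt (hp.1 m h) hxy
        cases hpx : p x
        · rw [List.find?_cons_of_neg (by simp [hpx]), hfy]
          simp
        · rw [List.find?_cons_of_pos hpx]
          simp [hkm]
    · have hb : PySem.List.insertBy (fun a b => decide (key b < key a)) x (y :: ys)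
          = y :: PySem.List.insertBy (fun a b => decide (key b < key a)) x ys := by
        simp [PySem.List.insertBy, hxy]
      rw [hb]
      cases hpy : p y
      · rw [List.find?_cons_of_neg (by simp [hpy]),
          List.find?_cons_of_neg (by simp [hpy])]
        exact ih hp.2
      · rw [List.find?_cons_of_pos hpy, List.find?_cons_of_pos hpy]
        simp [hxy]

-- max? over a one-element extension is one fold step
lemma pv_max?_concat {α κ : Type} [LT κ] [DecidableLT κ] (key : α → κ) (ys : List α) (x : α) :
    PySem.List.max? (ys ++ [x]) key =
      match PySem.List.max? ys key with
      | none => some x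
      | some m => if key m < key x then some x else some m := by
  simp only [PySem.List.max?, List.foldl_append]
  rfl

-- the core fact: first match in the stable length-descending sort
-- = first maximal element of the in-order filtered list
lemma pv_find?_sorted_rev_eq_max?_filter {α κ : Type} [LinearOrder κ] (key : α → κ)
    (p : α → Bool) (xs : List α) :
    (PySem.List.sorted xs key true).find? p = PySem.List.max? (xs.filter p) key := by
  induction xs using List.reverseRecOn with
  | nil => simp [PySem.List.sorted, PySem.List.max?]
  | append_singleton ys x ih =>
    have hs : PySem.List.sorted (ys ++ [x]) key true
        = PySem.List.insertBy (fun a b => decide (key b < key a)) x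
            (PySem.List.sorted ys key true) := by
      rw [PySem.List.sorted_rev_eq_foldl_insertBy, PySem.List.sorted_rev_eq_foldl_insertBy,
        List.foldl_append]
      simp
    rw [hs, pv_find?_insertBy key p x _ (PySem.List.sorted_pairwise_rev ys key), ih]
    rw [List.filter_append, List.filter_singleton]
    cases hpx : p x
    · simp only [cond_false, List.append_nil]
      cases PySem.List.max? (List.filter p ys) key <;> simp
    · simp only [cond_true]
      rw [pv_max?_concat]
      cases PySem.List.max? (List.filter p ys) key <;> simp

-- B's fused pass (evaluate p only on features longer than the current best) is max? of the filter
lemma pv_foldl_best_eq_max?_filter (p : String → Bool) (xs : List String) :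
    ∀ (acc : Option String),
    xs.foldl (fun best f => if pvLonger best f && p f then some f else best) acc
      = (xs.filter p).foldl
          (fun acc x =>
            match acc with
            | none => some x
            | some m => if m.toList.length < x.toList.length then some x else some m) acc := by
  induction xs with
  | nil => intro acc; rfl
  | cons f fs ih =>
    intro acc
    rw [List.foldl_cons, List.filter_cons]
    cases hpf : p f
    · simp only [Bool.and_false, Bool.false_eq_true, if_false]
      exact ih acc
    · simp only [Bool.and_true]
      have hstep : (if pvLonger acc f = true then some f else acc)
          = match acc with
            | none => some f
            | some m => if m.toList.length < f.toList.length then some f else some m := by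
        cases acc <;> simp [pvLonger]
      rw [hstep]
      exact ih _

-- ===== VERDICT (by name: the statement is the Claim_ definition above) =====
theorem normalize_feature_name_spec : Claim_equal_normalize_feature_name := by
  intro t ofs _
  unfold Spec_normalize_feature_name normalize_feature_name normalize_feature_name_alt
  simp only [pv_foldl_best_eq_max?_filter]
  have hmax : ∀ (p : String → Bool),
      (PySem.List.sorted ofs (fun f => f.toList.length) true).find? p
        = (ofs.filter p).foldl
            (fun acc x =>
              match acc with
              | none => some x
              | some m => if m.toList.length < x.toList.length then some x else some m) none := by
    intro p
    rw [pv_find?_sorted_rev_eq_max?_filter (fun f => f.toList.length) p ofs]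
    unfold PySem.List.max?
    congr 1
    funext acc x
    cases acc <;> simp
  rw [hmax, hmax]
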